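-- pv_equiv track=rewrite | github.com/Deferare/Problem-Solving | Programmers/성격 유형 검사하기.py | solution
-- ===== SOURCE A (Python) =====
-- def solution(survey, choices):
--     answer = ''
--
--     chart = {
--         "RT": [0, 0],
--         "TR": [0, 0],
--         "FC": [0, 0],
--         "CF": [0, 0],
--         "MJ": [0, 0],
--         "JM": [0, 0],
--         "AN": [0, 0],
--         "NA": [0, 0],
--     }
--
--     chart2 = {
--         "RT": [0, 0],
--         "CF": [0, 0],
--         "JM": [0, 0],
--         "AN": [0, 0],
--     }
--
--     for i in range(0, choices.__len__()):
--         if choices[i] == 1: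
--             chart[survey[i]][0] += 3
--         if choices[i] == 7:
--             chart[survey[i]][1] += 3
--
--         if choices[i] == 2:
--             chart[survey[i]][0] += 2
--         if choices[i] == 6:
--             chart[survey[i]][1] += 2
--
--         if choices[i] == 3:
--             chart[survey[i]][0] += 1
--         if choices[i] == 5:
--             chart[survey[i]][1] += 1
--
--     for key in chart.keys():
--         ind = 0
--         if key[0] == "R" or key[1] == "R":
--             if key[1] == "R":
--                 ind = 1
--             chart2["RT"][0] += chart[key][ind]
--
--         ind = 0
--         if key[0] == "T" or key[1] == "T":
--             if key[1] == "T":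
--                 ind = 1
--             chart2["RT"][1] += chart[key][ind]
--
--         ind = 0
--         if key[0] == "C" or key[1] == "C":
--             if key[1] == "C":
--                 ind = 1
--             chart2["CF"][0] += chart[key][ind]
--
--         ind = 0
--         if key[0] == "F" or key[1] == "F":
--             if key[1] == "F":
--                 ind = 1
--             chart2["CF"][1] += chart[key][ind]
--
--         ind = 0
--         if key[0] == "J" or key[1] == "J":
--             if key[1] == "J":
--                 ind = 1
--             chart2["JM"][0] += chart[key][ind]
--
--         ind = 0
--         if key[0] == "M" or key[1] == "M":
--             if key[1] == "M":
--                 ind = 1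
--             chart2["JM"][1] += chart[key][ind]
--
--         ind = 0
--         if key[0] == "A" or key[1] == "A":
--             if key[1] == "A":
--                 ind = 1
--             chart2["AN"][0] += chart[key][ind]
--
--         ind = 0
--         if key[0] == "N" or key[1] == "N":
--             if key[1] == "N":
--                 ind = 1
--             chart2["AN"][1] += chart[key][ind]
--
--     for key in chart2:
--         if chart2[key][0] > chart2[key][1]:
--             answer += key[0]
--         elif chart2[key][0] < chart2[key][1]:
--             answer += key[1]
--         else:
--             answer += min(key[0], key[1])
--
--     return answer
-- ===== SOURCE B (Python) =====
-- def solution(survey, choices):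
--     score = {l: 0 for l in "RTCFJMAN"}
--     for s, c in zip(survey, choices):
--         if c in (1, 2, 3):
--             score[s[0]] += 4 - c
--         elif c in (5, 6, 7):
--             score[s[1]] += c - 4
--     return "".join(a if score[a] >= score[b] else b for a, b in ("RT", "CF", "JM", "AN"))
-- ===== Notes on version B (the rewrite author's own statement) =====
-- stated objective: simpler
-- what changed: B replaces A's 8-key bidirectional chart of [left,right] pairs and its entire second 64-branch aggregation loop by a single flat per-letter score dict filled in one pass over zip(survey, choices), reading the result directly off the four letter pairs with a >= tie-break.
import Mathlib
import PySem

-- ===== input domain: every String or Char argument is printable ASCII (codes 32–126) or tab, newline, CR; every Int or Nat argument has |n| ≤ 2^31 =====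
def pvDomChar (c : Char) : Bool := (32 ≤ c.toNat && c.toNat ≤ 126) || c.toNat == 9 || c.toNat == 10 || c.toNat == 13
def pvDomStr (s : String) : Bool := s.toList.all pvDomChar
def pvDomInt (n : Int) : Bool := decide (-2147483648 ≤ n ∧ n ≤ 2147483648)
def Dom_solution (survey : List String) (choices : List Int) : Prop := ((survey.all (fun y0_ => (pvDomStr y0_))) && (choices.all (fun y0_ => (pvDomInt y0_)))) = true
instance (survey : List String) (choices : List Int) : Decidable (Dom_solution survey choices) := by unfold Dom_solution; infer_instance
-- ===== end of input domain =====

-- B replaces A's 8-key bidirectional chart and its whole second aggregation pass by one flat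
-- per-letter score dict filled in a single zip pass (objective: simpler).

-- ===== PORT A =====
-- v[j] += p  on the two-element lists stored in A's dicts
def pvBump (j : Nat) (p : Int) (v : List Int) : List Int := v.set j (v.getD j 0 + p)

def pvChartInit : PySem.Dict String (List Int) :=
  PySem.Dict.mk [("RT",[0,0]),("TR",[0,0]),("FC",[0,0]),("CF",[0,0]),("MJ",[0,0]),("JM",[0,0]),("AN",[0,0]),("NA",[0,0])]

def pvChart2Init : PySem.Dict String (List Int) :=
  PySem.Dict.mk [("RT",[0,0]),("CF",[0,0]),("JM",[0,0]),("AN",[0,0])]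

-- body of A's first loop for one index i (the six ifs in A's order)
def pvStep1 (survey : List String) (choices : List Int)
    (ch : PySem.Dict String (List Int)) (i : Int) : PySem.Dict String (List Int) :=
  let c := PySem.List.pyGetD choices i 0
  let s := PySem.List.pyGetD survey i ""
  let ch := if c == 1 then ch.modify s [0,0] (pvBump 0 3) else ch
  let ch := if c == 7 then ch.modify s [0,0] (pvBump 1 3) else ch
  let ch := if c == 2 then ch.modify s [0,0] (pvBump 0 2) else ch
  let ch := if c == 6 then ch.modify s [0,0] (pvBump 1 2) else ch
  let ch := if c == 3 then ch.modify s [0,0] (pvBump 0 1) else ch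
  let ch := if c == 5 then ch.modify s [0,0] (pvBump 1 1) else ch
  ch

-- one of the eight per-letter blocks of A's second loop
def pvAgg (ch : PySem.Dict String (List Int)) (key : String) (k0 k1 : Char) (L : Char)
    (pair : String) (pos : Nat) (c2 : PySem.Dict String (List Int)) : PySem.Dict String (List Int) :=
  if k0 == L || k1 == L then
    c2.modify pair [0,0] (pvBump pos ((ch.getD key []).getD (if k1 == L then 1 else 0) 0))
  else c2

-- body of A's second loop for one key of chart
def pvStep2 (ch : PySem.Dict String (List Int)) (c2 : PySem.Dict String (List Int))
    (key : String) : PySem.Dict String (List Int) :=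
  let k0 := (PySem.Str.pyGet? key 0).getD ' '
  let k1 := (PySem.Str.pyGet? key 1).getD ' '
  let c2 := pvAgg ch key k0 k1 'R' "RT" 0 c2
  let c2 := pvAgg ch key k0 k1 'T' "RT" 1 c2
  let c2 := pvAgg ch key k0 k1 'C' "CF" 0 c2
  let c2 := pvAgg ch key k0 k1 'F' "CF" 1 c2
  let c2 := pvAgg ch key k0 k1 'J' "JM" 0 c2
  let c2 := pvAgg ch key k0 k1 'M' "JM" 1 c2
  let c2 := pvAgg ch key k0 k1 'A' "AN" 0 c2
  let c2 := pvAgg ch key k0 k1 'N' "AN" 1 c2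
  c2

-- body of A's third loop (the answer is the growing list of chars of the string)
def pvStep3 (c2 : PySem.Dict String (List Int)) (ans : List Char) (key : String) : List Char :=
  let k0 := (PySem.Str.pyGet? key 0).getD ' '
  let k1 := (PySem.Str.pyGet? key 1).getD ' '
  let v := c2.getD key []
  if v.getD 0 0 > v.getD 1 0 then ans ++ [k0]
  else if v.getD 0 0 < v.getD 1 0 then ans ++ [k1]
  else ans ++ [min k0 k1]

def solution (survey : List String) (choices : List Int) : String :=
  let chart := (PySem.List.pyRange 0 (choices.length : Int) 1).foldl (pvStep1 survey choices) pvChartInit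
  let chart2 := chart.keys.foldl (pvStep2 chart) pvChart2Init
  String.ofList (chart2.keys.foldl (pvStep3 chart2) [])

-- ===== PORT B =====
def pvScoreInit : PySem.Dict Char Int :=
  PySem.Dict.mk [('R',0),('T',0),('C',0),('F',0),('J',0),('M',0),('A',0),('N',0)]

def pvBStep (sc : PySem.Dict Char Int) (p : String × Int) : PySem.Dict Char Int :=
  if p.2 == 1 || p.2 == 2 || p.2 == 3 then
    sc.modify ((PySem.Str.pyGet? p.1 0).getD ' ') 0 (· + (4 - p.2))
  else if p.2 == 5 || p.2 == 6 || p.2 == 7 then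
    sc.modify ((PySem.Str.pyGet? p.1 1).getD ' ') 0 (· + (p.2 - 4))
  else sc

def solution_alt (survey : List String) (choices : List Int) : String :=
  let score := (survey.zip choices).foldl pvBStep pvScoreInit
  String.ofList ([('R','T'),('C','F'),('J','M'),('A','N')].map
    (fun q => if score.getD q.1 0 ≥ score.getD q.2 0 then q.1 else q.2))

-- ===== PRECONDITION & SPEC =====
def pvScoring (c : Int) : Bool := c == 1 || c == 2 || c == 3 || c == 5 || c == 6 || c == 7
def pvKeys8 : List String := ["RT","TR","FC","CF","MJ","JM","AN","NA"]

-- Pre_ excludes exactly the inputs where Python A raises: an index whose choice scores points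
-- (1,2,3,5,6,7) must have a survey entry, and that entry must be one of A's eight chart keys
-- (otherwise chart[survey[i]] is a KeyError / survey[i] an IndexError).
def Pre_solution (survey : List String) (choices : List Int) : Prop :=
  ∀ i : Nat, i < choices.length → pvScoring (choices.getD i 0) = true →
    i < survey.length ∧ survey.getD i "" ∈ pvKeys8
instance (survey : List String) (choices : List Int) : Decidable (Pre_solution survey choices) := by
  unfold Pre_solution; infer_instance

def pvWitness_solution : List String × List Int := (["RT","CF"], [1, 7])

def Spec_solution (survey : List String) (choices : List Int) (out : String) : Prop := out = solution_alt survey choices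
instance (survey : List String) (choices : List Int) (out : String) : Decidable (Spec_solution survey choices out) := by unfold Spec_solution; infer_instance

-- ===== CLAIM (what is proved, stated in full; the proofs are below) =====
def Claim_equal_solution : Prop := ∀ (survey : List String) (choices : List Int), Dom_solution survey choices → Pre_solution survey choices → Spec_solution survey choices (solution survey choices)

-- ===== LEMMAS AND PROOFS =====

-- abstraction of A's chart state: its sixteen counters
structure PvS where
  (rt0 rt1 tr0 tr1 fc0 fc1 cf0 cf1 mj0 mj1 jm0 jm1 an0 an1 na0 na1 : Int)
deriving Repr, DecidableEq

def pvC (v : PvS) : PySem.Dict String (List Int) :=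
  PySem.Dict.mk [("RT",[v.rt0,v.rt1]),("TR",[v.tr0,v.tr1]),("FC",[v.fc0,v.fc1]),("CF",[v.cf0,v.cf1]),
                 ("MJ",[v.mj0,v.mj1]),("JM",[v.jm0,v.jm1]),("AN",[v.an0,v.an1]),("NA",[v.na0,v.na1])]

-- B's score dict, expressed by the same sixteen counters
def pvSc (v : PvS) : PySem.Dict Char Int :=
  PySem.Dict.mk [('R',v.rt0+v.tr1),('T',v.tr0+v.rt1),('C',v.cf0+v.fc1),('F',v.fc0+v.cf1),
                 ('J',v.jm0+v.mj1),('M',v.mj0+v.jm1),('A',v.an0+v.na1),('N',v.na0+v.an1)]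

def pv0 : PvS := ⟨0,0,0,0,0,0,0,0,0,0,0,0,0,0,0,0⟩

-- A's first loop, restructured as simultaneous recursion on the two lists
def pvStepPair (s : String) (c : Int) (ch : PySem.Dict String (List Int)) : PySem.Dict String (List Int) :=
  let ch := if c == 1 then ch.modify s [0,0] (pvBump 0 3) else ch
  let ch := if c == 7 then ch.modify s [0,0] (pvBump 1 3) else ch
  let ch := if c == 2 then ch.modify s [0,0] (pvBump 0 2) else ch
  let ch := if c == 6 then ch.modify s [0,0] (pvBump 1 2) else ch
  let ch := if c == 3 then ch.modify s [0,0] (pvBump 0 1) else ch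
  let ch := if c == 5 then ch.modify s [0,0] (pvBump 1 1) else ch
  ch

def pvGo (ss : List String) (cs : List Int) (ch : PySem.Dict String (List Int)) : PySem.Dict String (List Int) :=
  match cs with
  | [] => ch
  | c :: cs => pvGo ss.tail cs (pvStepPair (ss.headD "") c ch)

lemma pv_step1_shift (ss : List String) (c : Int) (cs : List Int)
    (ch : PySem.Dict String (List Int)) (k : Nat) :
    pvStep1 ss (c :: cs) ch ((0 : Int) + ↑(k + 1)) = pvStep1 ss.tail cs ch ((0 : Int) + ↑k) := by
  have ek : ((0:Int) + ↑(k+1)) = ((k+1 : Nat) : Int) := by push_cast; ring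
  have ek0 : ((0:Int) + (↑k : Int)) = ((k : Nat) : Int) := by ring
  have h1 : PySem.List.pyGetD (c :: cs) ((0:Int) + ↑(k+1)) 0 = PySem.List.pyGetD cs ((0:Int) + ↑k) 0 := by
    rw [ek, ek0, PySem.List.pyGetD_natCast, PySem.List.pyGetD_natCast]; simp
  have h2 : PySem.List.pyGetD ss ((0:Int) + ↑(k+1)) "" = PySem.List.pyGetD ss.tail ((0:Int) + ↑k) "" := by
    rw [ek, ek0, PySem.List.pyGetD_natCast, PySem.List.pyGetD_natCast]
    cases ss <;> simp
  simp only [pvStep1, h1, h2]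

lemma pv_step1_zero (ss : List String) (c : Int) (cs : List Int) (ch : PySem.Dict String (List Int)) :
    pvStep1 ss (c :: cs) ch ((0 : Int) + ↑(0 : Nat)) = pvStepPair (ss.headD "") c ch := by
  have e0 : ((0:Int) + ↑(0:Nat)) = ((0 : Nat) : Int) := by simp
  have h2 : PySem.List.pyGetD ss ((0:Int) + ↑(0:Nat)) "" = ss.headD "" := by
    rw [e0, PySem.List.pyGetD_natCast]; cases ss <;> rfl
  have h1 : PySem.List.pyGetD (c :: cs) ((0:Int) + ↑(0:Nat)) 0 = c := by
    rw [e0, PySem.List.pyGetD_natCast]; simp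
  simp only [pvStep1, pvStepPair, h1, h2]

lemma pv_loop1 : ∀ (cs : List Int) (ss : List String) (ch : PySem.Dict String (List Int)),
    (PySem.List.pyRange 0 (cs.length : Int) 1).foldl (pvStep1 ss cs) ch = pvGo ss cs ch := by
  intro cs
  induction cs with
  | nil => intro ss ch; rw [show (([] : List Int).length : Int) = 0 by simp, PySem.List.pyRange_one_eq_nil (le_refl 0)]; rfl
  | cons c cs ih =>
    intro ss ch
    rw [PySem.List.pyRange_one]
    have hl : (((c :: cs).length : Int) - 0).toNat = cs.length + 1 := by simp
    rw [hl, List.range_succ_eq_map]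
    simp only [List.map_cons, List.foldl_cons, List.map_map, List.foldl_map, Function.comp]
    rw [pv_step1_zero]
    have ih' := ih ss.tail (pvStepPair (ss.headD "") c ch)
    rw [PySem.List.pyRange_one] at ih'
    have hl2 : ((cs.length : Int) - 0).toNat = cs.length := by simp
    rw [hl2, List.foldl_map] at ih'
    rw [show pvGo ss (c :: cs) ch = pvGo ss.tail cs (pvStepPair (ss.headD "") c ch) from rfl, ← ih']
    exact PySem.List.foldl_congr_mem _ _ _ _ (fun acc k _ => pv_step1_shift ss c cs acc k)


lemma pv_low (s : String) (hs : s ∈ pvKeys8) (p : Int) (v : PvS) :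
    ∃ w : PvS, (pvC v).modify s [0,0] (pvBump 0 p) = pvC w ∧
      (pvSc v).modify ((PySem.Str.pyGet? s 0).getD ' ') 0 (· + p) = pvSc w := by
  simp only [pvKeys8, List.mem_cons, List.not_mem_nil, or_false] at hs
  rcases hs with rfl|rfl|rfl|rfl|rfl|rfl|rfl|rfl
  · exact ⟨{ v with rt0 := v.rt0 + p }, by simp [pvC, pvSc, pvBump, PySem.Dict.modify, PySem.Dict.insert, PySem.Dict.getD, PySem.Dict.get?, PySem.Dict.contains] <;> omega, by simp [pvC, pvSc, pvBump, PySem.Dict.modify, PySem.Dict.insert, PySem.Dict.getD, PySem.Dict.get?, PySem.Dict.contains] <;> omega⟩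
  · exact ⟨{ v with tr0 := v.tr0 + p }, by simp [pvC, pvSc, pvBump, PySem.Dict.modify, PySem.Dict.insert, PySem.Dict.getD, PySem.Dict.get?, PySem.Dict.contains] <;> omega, by simp [pvC, pvSc, pvBump, PySem.Dict.modify, PySem.Dict.insert, PySem.Dict.getD, PySem.Dict.get?, PySem.Dict.contains] <;> omega⟩
  · exact ⟨{ v with fc0 := v.fc0 + p }, by simp [pvC, pvSc, pvBump, PySem.Dict.modify, PySem.Dict.insert, PySem.Dict.getD, PySem.Dict.get?, PySem.Dict.contains] <;> omega, by simp [pvC, pvSc, pvBump, PySem.Dict.modify, PySem.Dict.insert, PySem.Dict.getD, PySem.Dict.get?, PySem.Dict.contains] <;> omega⟩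
  · exact ⟨{ v with cf0 := v.cf0 + p }, by simp [pvC, pvSc, pvBump, PySem.Dict.modify, PySem.Dict.insert, PySem.Dict.getD, PySem.Dict.get?, PySem.Dict.contains] <;> omega, by simp [pvC, pvSc, pvBump, PySem.Dict.modify, PySem.Dict.insert, PySem.Dict.getD, PySem.Dict.get?, PySem.Dict.contains] <;> omega⟩
  · exact ⟨{ v with mj0 := v.mj0 + p }, by simp [pvC, pvSc, pvBump, PySem.Dict.modify, PySem.Dict.insert, PySem.Dict.getD, PySem.Dict.get?, PySem.Dict.contains] <;> omega, by simp [pvC, pvSc, pvBump, PySem.Dict.modify, PySem.Dict.insert, PySem.Dict.getD, PySem.Dict.get?, PySem.Dict.contains] <;> omega⟩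
  · exact ⟨{ v with jm0 := v.jm0 + p }, by simp [pvC, pvSc, pvBump, PySem.Dict.modify, PySem.Dict.insert, PySem.Dict.getD, PySem.Dict.get?, PySem.Dict.contains] <;> omega, by simp [pvC, pvSc, pvBump, PySem.Dict.modify, PySem.Dict.insert, PySem.Dict.getD, PySem.Dict.get?, PySem.Dict.contains] <;> omega⟩
  · exact ⟨{ v with an0 := v.an0 + p }, by simp [pvC, pvSc, pvBump, PySem.Dict.modify, PySem.Dict.insert, PySem.Dict.getD, PySem.Dict.get?, PySem.Dict.contains] <;> omega, by simp [pvC, pvSc, pvBump, PySem.Dict.modify, PySem.Dict.insert, PySem.Dict.getD, PySem.Dict.get?, PySem.Dict.contains] <;> omega⟩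
  · exact ⟨{ v with na0 := v.na0 + p }, by simp [pvC, pvSc, pvBump, PySem.Dict.modify, PySem.Dict.insert, PySem.Dict.getD, PySem.Dict.get?, PySem.Dict.contains] <;> omega, by simp [pvC, pvSc, pvBump, PySem.Dict.modify, PySem.Dict.insert, PySem.Dict.getD, PySem.Dict.get?, PySem.Dict.contains] <;> omega⟩

lemma pv_high (s : String) (hs : s ∈ pvKeys8) (p : Int) (v : PvS) :
    ∃ w : PvS, (pvC v).modify s [0,0] (pvBump 1 p) = pvC w ∧
      (pvSc v).modify ((PySem.Str.pyGet? s 1).getD ' ') 0 (· + p) = pvSc w := by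
  simp only [pvKeys8, List.mem_cons, List.not_mem_nil, or_false] at hs
  rcases hs with rfl|rfl|rfl|rfl|rfl|rfl|rfl|rfl
  · exact ⟨{ v with rt1 := v.rt1 + p }, by simp [pvC, pvSc, pvBump, PySem.Dict.modify, PySem.Dict.insert, PySem.Dict.getD, PySem.Dict.get?, PySem.Dict.contains] <;> omega, by simp [pvC, pvSc, pvBump, PySem.Dict.modify, PySem.Dict.insert, PySem.Dict.getD, PySem.Dict.get?, PySem.Dict.contains] <;> omega⟩
  · exact ⟨{ v with tr1 := v.tr1 + p }, by simp [pvC, pvSc, pvBump, PySem.Dict.modify, PySem.Dict.insert, PySem.Dict.getD, PySem.Dict.get?, PySem.Dict.contains] <;> omega, by simp [pvC, pvSc, pvBump, PySem.Dict.modify, PySem.Dict.insert, PySem.Dict.getD, PySem.Dict.get?, PySem.Dict.contains] <;> omega⟩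
  · exact ⟨{ v with fc1 := v.fc1 + p }, by simp [pvC, pvSc, pvBump, PySem.Dict.modify, PySem.Dict.insert, PySem.Dict.getD, PySem.Dict.get?, PySem.Dict.contains] <;> omega, by simp [pvC, pvSc, pvBump, PySem.Dict.modify, PySem.Dict.insert, PySem.Dict.getD, PySem.Dict.get?, PySem.Dict.contains] <;> omega⟩
  · exact ⟨{ v with cf1 := v.cf1 + p }, by simp [pvC, pvSc, pvBump, PySem.Dict.modify, PySem.Dict.insert, PySem.Dict.getD, PySem.Dict.get?, PySem.Dict.contains] <;> omega, by simp [pvC, pvSc, pvBump, PySem.Dict.modify, PySem.Dict.insert, PySem.Dict.getD, PySem.Dict.get?, PySem.Dict.contains] <;> omega⟩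
  · exact ⟨{ v with mj1 := v.mj1 + p }, by simp [pvC, pvSc, pvBump, PySem.Dict.modify, PySem.Dict.insert, PySem.Dict.getD, PySem.Dict.get?, PySem.Dict.contains] <;> omega, by simp [pvC, pvSc, pvBump, PySem.Dict.modify, PySem.Dict.insert, PySem.Dict.getD, PySem.Dict.get?, PySem.Dict.contains] <;> omega⟩
  · exact ⟨{ v with jm1 := v.jm1 + p }, by simp [pvC, pvSc, pvBump, PySem.Dict.modify, PySem.Dict.insert, PySem.Dict.getD, PySem.Dict.get?, PySem.Dict.contains] <;> omega, by simp [pvC, pvSc, pvBump, PySem.Dict.modify, PySem.Dict.insert, PySem.Dict.getD, PySem.Dict.get?, PySem.Dict.contains] <;> omega⟩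
  · exact ⟨{ v with an1 := v.an1 + p }, by simp [pvC, pvSc, pvBump, PySem.Dict.modify, PySem.Dict.insert, PySem.Dict.getD, PySem.Dict.get?, PySem.Dict.contains] <;> omega, by simp [pvC, pvSc, pvBump, PySem.Dict.modify, PySem.Dict.insert, PySem.Dict.getD, PySem.Dict.get?, PySem.Dict.contains] <;> omega⟩
  · exact ⟨{ v with na1 := v.na1 + p }, by simp [pvC, pvSc, pvBump, PySem.Dict.modify, PySem.Dict.insert, PySem.Dict.getD, PySem.Dict.get?, PySem.Dict.contains] <;> omega, by simp [pvC, pvSc, pvBump, PySem.Dict.modify, PySem.Dict.insert, PySem.Dict.getD, PySem.Dict.get?, PySem.Dict.contains] <;> omega⟩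


lemma pv_noopA (s : String) (c : Int) (hc : pvScoring c = false) (ch : PySem.Dict String (List Int)) :
    pvStepPair s c ch = ch := by
  simp only [pvScoring, Bool.or_eq_false_iff, beq_eq_false_iff_ne, ne_eq] at hc
  obtain ⟨⟨⟨⟨⟨h1, h2⟩, h3⟩, h5⟩, h6⟩, h7⟩ := hc
  simp [pvStepPair, h1, h2, h3, h5, h6, h7]

lemma pv_noopB (s : String) (c : Int) (hc : pvScoring c = false) (sc : PySem.Dict Char Int) :
    pvBStep sc (s, c) = sc := by
  simp only [pvScoring, Bool.or_eq_false_iff, beq_eq_false_iff_ne, ne_eq] at hc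
  obtain ⟨⟨⟨⟨⟨h1, h2⟩, h3⟩, h5⟩, h6⟩, h7⟩ := hc
  simp [pvBStep, h1, h2, h3, h5, h6, h7]

lemma pv_step_comm (s : String) (c : Int) (hs : pvScoring c = true → s ∈ pvKeys8) (v : PvS) :
    ∃ w : PvS, pvStepPair s c (pvC v) = pvC w ∧ pvBStep (pvSc v) (s, c) = pvSc w := by
  by_cases hc : pvScoring c = true
  · have hmem := hs hc
    simp only [pvScoring, Bool.or_eq_true, beq_iff_eq] at hc
    rcases hc with ((((hc | hc) | hc) | hc) | hc) | hc <;> subst hc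
    · have := pv_low s hmem 3 v
      simpa [pvStepPair, pvBStep, show (4 - 1 : Int) = 3 by norm_num] using this
    · have := pv_low s hmem 2 v
      simpa [pvStepPair, pvBStep, show (4 - 2 : Int) = 2 by norm_num] using this
    · have := pv_low s hmem 1 v
      simpa [pvStepPair, pvBStep, show (4 - 3 : Int) = 1 by norm_num] using this
    · have := pv_high s hmem 1 v
      simpa [pvStepPair, pvBStep, show (5 - 4 : Int) = 1 by norm_num] using this
    · have := pv_high s hmem 2 v
      simpa [pvStepPair, pvBStep, show (6 - 4 : Int) = 2 by norm_num] using this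
    · have := pv_high s hmem 3 v
      simpa [pvStepPair, pvBStep, show (7 - 4 : Int) = 3 by norm_num] using this
  · exact ⟨v, pv_noopA s c (by simpa using hc) _, pv_noopB s c (by simpa using hc) _⟩

lemma pv_main : ∀ (cs : List Int) (ss : List String) (v : PvS),
    (∀ i : Nat, i < cs.length → pvScoring (cs.getD i 0) = true →
      i < ss.length ∧ ss.getD i "" ∈ pvKeys8) →
    ∃ w : PvS, pvGo ss cs (pvC v) = pvC w ∧ (ss.zip cs).foldl pvBStep (pvSc v) = pvSc w := by
  intro cs
  induction cs with
  | nil => intro ss v _; exact ⟨v, rfl, by simp⟩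
  | cons c cs ih =>
    intro ss v hpre
    have hpre' : ∀ i : Nat, i < cs.length → pvScoring (cs.getD i 0) = true →
        i < ss.tail.length ∧ ss.tail.getD i "" ∈ pvKeys8 := by
      intro i hi hsc
      have := hpre (i + 1) (by simpa using hi) (by simpa using hsc)
      cases ss with
      | nil => simpa using this
      | cons a ss' => simpa using this
    cases ss with
    | nil =>
      have hns : pvScoring c = false := by
        by_contra h
        have := hpre 0 (by simp) (by simpa using h)
        simpa using this.1
      obtain ⟨w, hA, hB⟩ := ih [] v (by simpa using hpre')
      refine ⟨w, ?_, ?_⟩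
      · show pvGo [] (c :: cs) (pvC v) = pvC w
        show pvGo [] cs (pvStepPair "" c (pvC v)) = pvC w
        rwa [pv_noopA _ _ hns]
      · simpa using hB
    | cons s ss' =>
      have hstep : pvScoring c = true → s ∈ pvKeys8 := by
        intro h
        simpa using (hpre 0 (by simp) (by simpa using h)).2
      obtain ⟨w1, hA1, hB1⟩ := pv_step_comm s c hstep v
      obtain ⟨w, hA, hB⟩ := ih ss' w1 (by simpa using hpre')
      refine ⟨w, ?_, ?_⟩
      · show pvGo ss' cs (pvStepPair s c (pvC v)) = pvC w
        rwa [hA1]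
      · show ((s, c) :: ss'.zip cs).foldl pvBStep (pvSc v) = pvSc w
        simp only [List.foldl_cons]
        rwa [hB1]


set_option maxHeartbeats 1000000 in
lemma pv_chart2 (w : PvS) :
    (pvC w).keys.foldl (pvStep2 (pvC w)) pvChart2Init =
      PySem.Dict.mk [("RT",[0 + w.rt0 + w.tr1, 0 + w.rt1 + w.tr0]),
                     ("CF",[0 + w.cf0 + w.fc1, 0 + w.fc0 + w.cf1]),
                     ("JM",[0 + w.jm0 + w.mj1, 0 + w.jm1 + w.mj0]),
                     ("AN",[0 + w.an0 + w.na1, 0 + w.an1 + w.na0])] := by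
  simp [pvC, pvStep2, pvAgg, pvBump, pvChart2Init, PySem.Dict.keys, PySem.Dict.modify,
        PySem.Dict.insert, PySem.Dict.getD, PySem.Dict.get?, PySem.Dict.contains]
  omega

set_option maxHeartbeats 1000000 in
lemma pv_final (w : PvS) :
    String.ofList (((pvC w).keys.foldl (pvStep2 (pvC w)) pvChart2Init).keys.foldl
        (pvStep3 ((pvC w).keys.foldl (pvStep2 (pvC w)) pvChart2Init)) [])
      = String.ofList ([('R','T'),('C','F'),('J','M'),('A','N')].map
          (fun q => if (pvSc w).getD q.1 0 ≥ (pvSc w).getD q.2 0 then q.1 else q.2)) := by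
  rw [pv_chart2]
  simp only [PySem.Dict.keys]
  simp [pvStep3, pvSc, PySem.Dict.getD, PySem.Dict.get?, List.foldl_cons]
  split_ifs <;> first | rfl | omega


-- ===== VERDICT (by name: the statement is the Claim_ definition above) =====
theorem solution_spec : Claim_equal_solution := by
  intro survey choices _ hpre
  unfold Spec_solution solution solution_alt
  rw [pv_loop1]
  have hinit : pvChartInit = pvC pv0 := rfl
  have hinitB : pvScoreInit = pvSc pv0 := by decide
  rw [hinit, hinitB]
  obtain ⟨w, hA, hB⟩ := pv_main choices survey pv0 hpre
  rw [hA, hB]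
  exact pv_final w
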